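-- pv_equiv track=rewrite | github.com/pmboxbiz/zed-context-cleaner | python/zed_cleanup.py | find_protected_indices
-- ===== SOURCE A (Python) =====
-- def find_protected_indices(messages: list, keep_last_dialogs: int) -> set:
--     """
--     Возвращает set индексов сообщений которые трогать нельзя —
--     это последние keep_last_dialogs диалогов (считаем по User сообщениям).
--     """
--     if keep_last_dialogs <= 0:
--         return set()
--
--     # Находим индексы всех User сообщений
--     user_indices = []
--     for i, m in enumerate(messages):
--         if not isinstance(m, dict):
--             continue
--         if "User" in m:
--             user_indices.append(i)
--
--     # Берём последние N User сообщений
--     cutoff_user_indices = set(user_indices[-keep_last_dialogs:])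
--
--     if not cutoff_user_indices:
--         return set()
--
--     # Минимальный индекс User из защищённых
--     min_protected = min(cutoff_user_indices)
--
--     # Защищаем все сообщения начиная с этого индекса
--     return set(range(min_protected, len(messages)))
-- ===== SOURCE B (Python) =====
-- def find_protected_indices(messages: list, keep_last_dialogs: int) -> set:
--     """Single backward early-stopping pass, counting User messages."""
--     if keep_last_dialogs <= 0:
--         return set()
--     count = 0
--     boundary = None
--     for i, m in reversed(list(enumerate(messages))):
--         if isinstance(m, dict) and "User" in m:
--             count += 1
--             boundary = i
--             if count == keep_last_dialogs:
--                 break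
--     if boundary is None:
--         return set()
--     return set(range(boundary, len(messages)))
-- ===== Notes on version B (the rewrite author's own statement) =====
-- stated objective: alternative
-- what changed: Replaces 'collect all User indices, slice the last N, min' (full forward pass plus slice and min) with one backward early-stopping pass that counts User messages and stops at the N-th from the end.
import Mathlib
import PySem

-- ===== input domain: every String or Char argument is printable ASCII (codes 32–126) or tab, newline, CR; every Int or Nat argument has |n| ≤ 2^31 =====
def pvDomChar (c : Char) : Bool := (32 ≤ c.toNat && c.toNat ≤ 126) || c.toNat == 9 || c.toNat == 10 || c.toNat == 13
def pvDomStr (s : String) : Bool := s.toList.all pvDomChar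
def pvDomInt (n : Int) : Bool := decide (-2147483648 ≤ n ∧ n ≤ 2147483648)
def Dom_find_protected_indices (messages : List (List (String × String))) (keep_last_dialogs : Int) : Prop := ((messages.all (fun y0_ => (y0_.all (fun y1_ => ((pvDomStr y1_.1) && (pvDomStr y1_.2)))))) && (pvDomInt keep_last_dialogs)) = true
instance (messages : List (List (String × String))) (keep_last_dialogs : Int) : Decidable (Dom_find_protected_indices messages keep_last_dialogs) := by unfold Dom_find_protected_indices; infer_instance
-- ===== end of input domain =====

-- B replaces A's "collect all User indices, slice the last N, take the min" with a single
-- backward early-stopping pass counting User messages (alternative decomposition, same cost).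

-- ===== PORT A =====
-- '"User" in m' on a dict: key membership (isinstance(m, dict) is always true at this type)
def pvHasUser (m : List (String × String)) : Bool := PySem.Dict.contains ⟨m⟩ "User"

def find_protected_indices (messages : List (List (String × String))) (keep_last_dialogs : Int) : List Int :=
  if keep_last_dialogs ≤ 0 then [] else
  let user_indices : List Int := (PySem.List.enumerate messages 0).foldl
      (fun acc p => if pvHasUser p.2 then acc ++ [p.1] else acc) []
  let cutoff : PySem.Set Int :=
      PySem.Set.ofList (PySem.List.slice user_indices (some (-keep_last_dialogs)) none)
  if cutoff.isEmpty then [] else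
  match PySem.List.min? cutoff (fun x => x) with
  | some min_protected => PySem.List.pyRange min_protected (messages.length : Int) 1
  | none => []

-- ===== PORT B =====
-- the backward loop: count User messages, remember the last boundary, stop at the k-th
def pvBGo (k : Int) : Int → Option Int → List (Int × List (String × String)) → Option Int
  | _, bd, [] => bd
  | count, bd, (i, m) :: rest =>
    if pvHasUser m then
      if count + 1 = k then some i
      else pvBGo k (count + 1) (some i) rest
    else pvBGo k count bd rest

def find_protected_indices_alt (messages : List (List (String × String))) (keep_last_dialogs : Int) : List Int :=
  if keep_last_dialogs ≤ 0 then [] else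
  match pvBGo keep_last_dialogs 0 none (PySem.List.enumerate messages 0).reverse with
  | none => []
  | some boundary => PySem.List.pyRange boundary (messages.length : Int) 1

-- ===== PRECONDITION & SPEC =====
def Spec_find_protected_indices (messages : List (List (String × String))) (keep_last_dialogs : Int) (out : List Int) : Prop := out = find_protected_indices_alt messages keep_last_dialogs
instance (messages : List (List (String × String))) (keep_last_dialogs : Int) (out : List Int) : Decidable (Spec_find_protected_indices messages keep_last_dialogs out) := by unfold Spec_find_protected_indices; infer_instance

-- ===== CLAIM (what is proved, stated in full; the proofs are below) =====
def Claim_equal_find_protected_indices : Prop := ∀ (messages : List (List (String × String))) (keep_last_dialogs : Int), Dom_find_protected_indices messages keep_last_dialogs → Spec_find_protected_indices messages keep_last_dialogs (find_protected_indices messages keep_last_dialogs)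

-- ===== LEMMAS AND PROOFS =====

-- folding min over a list whose elements are all ≥ the seed leaves the seed
lemma pv_foldl_min_eq (t : List Int) : ∀ (x : Int), (∀ y ∈ t, x ≤ y) → t.foldl min x = x := by
  induction t with
  | nil => intro x _; rfl
  | cons a t ih =>
    intro x h
    simp only [List.foldl_cons]
    rw [min_eq_left (h a (by simp))]
    exact ih x (fun y hy => h y (by simp [hy]))

-- getLast? of a cons with nonempty tail
lemma pv_getLast?_cons_of_ne_nil {l : List Int} (i : Int) (h : l ≠ []) :
    (i :: l).getLast? = l.getLast? := by
  cases l with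
  | nil => exact absurd rfl h
  | cons a t => simp [List.getLast?_cons]

-- characterisation of the backward loop: V = User indices in traversal order of L
lemma pvBGo_eq (k : Int) (L : List (Int × List (String × String))) : ∀ (c : Int) (bd : Option Int), c < k →
    pvBGo k c bd L =
      (if k - c ≤ (((L.filter (fun p => pvHasUser p.2)).map Prod.fst).length : Int)
       then ((L.filter (fun p => pvHasUser p.2)).map Prod.fst)[(k - c - 1).toNat]?
       else if ((L.filter (fun p => pvHasUser p.2)).map Prod.fst).isEmpty then bd
       else ((L.filter (fun p => pvHasUser p.2)).map Prod.fst).getLast?) := by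
  induction L with
  | nil =>
    intro c bd hck
    simp only [List.filter_nil, List.map_nil, List.length_nil, List.isEmpty_nil]
    rw [if_neg (by push_cast; omega)]
    rfl
  | cons p rest ih =>
    intro c bd hck
    obtain ⟨i, m⟩ := p
    by_cases hu : pvHasUser m
    · simp only [pvBGo, hu, if_true, List.filter_cons, List.map_cons]
      by_cases hk : c + 1 = k
      · rw [if_pos hk]
        rw [if_pos (by simp; omega)]
        have : (k - c - 1).toNat = 0 := by omega
        simp [this]
      · rw [if_neg hk]
        rw [ih (c + 1) (some i) (by omega)]
        simp only [List.length_cons, List.isEmpty_cons, Bool.false_eq_true, if_false]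
        by_cases hle : k - (c + 1) ≤ (((rest.filter (fun p => pvHasUser p.2)).map Prod.fst).length : Int)
        · rw [if_pos hle, if_pos (by push_cast at hle ⊢; omega)]
          have hidx : (k - c - 1).toNat = (k - (c + 1) - 1).toNat + 1 := by omega
          rw [hidx]
          simp
        · rw [if_neg hle]
          by_cases hemp : ((rest.filter (fun p => pvHasUser p.2)).map Prod.fst) = []
          · simp only [hemp] at hle ⊢
            rw [if_pos (by simp)]
            rw [if_neg (by push_cast at hle ⊢; omega)]
            simp
          · rw [if_neg (by simpa [List.isEmpty_iff] using hemp)]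
            rw [if_neg (by push_cast at hle ⊢; omega)]
            exact (pv_getLast?_cons_of_ne_nil i hemp).symm
    · simp only [Bool.not_eq_true] at hu
      simp only [pvBGo, hu, Bool.false_eq_true, if_false, List.filter_cons]
      exact ih c bd hck

-- the head of "drop all but the last k" equals the boundary the backward loop finds
lemma pv_boundary (U : List Int) (k : Int) (hk : 0 < k) :
    (U.drop (U.length - k.toNat)).head? =
      (if k - 0 ≤ (U.reverse.length : Int) then U.reverse[(k - 0 - 1).toNat]?
       else if U.reverse.isEmpty then none else U.reverse.getLast?) := by
  rw [List.length_reverse, List.head?_eq_getElem?, List.getElem?_drop]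
  by_cases hle : k - 0 ≤ (U.length : Int)
  · rw [if_pos hle]
    rw [List.getElem?_reverse (by omega)]
    congr 1
    omega
  · rw [if_neg hle]
    have h0 : U.length - k.toNat = 0 := by omega
    rw [h0, List.getLast?_reverse]
    simp only [List.isEmpty_iff, List.reverse_eq_nil_iff, List.head?_eq_getElem?]
    by_cases hU : U = []
    · simp [hU]
    · rw [if_neg hU]

theorem find_protected_indices_spec : Claim_equal_find_protected_indices := by
  intro messages k _
  unfold Spec_find_protected_indices
  by_cases hk : k ≤ 0
  · simp [find_protected_indices, find_protected_indices_alt, hk]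
  · have hk' : 0 < k := by omega
    simp only [find_protected_indices, find_protected_indices_alt, if_neg hk,
      PySem.List.foldl_append_if, List.nil_append]
    rw [pvBGo_eq k _ 0 none (by omega)]
    rw [List.filter_reverse, List.map_reverse]
    set U : List Int := ((PySem.List.enumerate messages 0).filter (fun p => pvHasUser p.2)).map Prod.fst with hUdef
    have hpw : U.Pairwise (· < ·) := by
      rw [hUdef, List.pairwise_map]
      exact (PySem.List.pairwise_lt_enumerate messages 0).filter _
    -- the slice is "drop all but the last k"
    have hslice : PySem.List.slice U (some (-k)) none = U.drop (U.length - k.toNat) := by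
      rw [show (-k) = -((k.toNat : Nat) : Int) from by omega]
      exact PySem.List.slice_from_neg_natCast U k.toNat (by omega)
    rw [hslice]
    have hpwD : (U.drop (U.length - k.toNat)).Pairwise (· < ·) :=
      hpw.sublist (List.drop_sublist _ _)
    rw [PySem.Set.ofList_eq_self_of_nodup (xs := U.drop (U.length - k.toNat)) (hpwD.imp ne_of_lt)]
    rw [← pv_boundary U k hk']
    cases hD : U.drop (U.length - k.toNat) with
    | nil => simp
    | cons d t =>
      have hmin : t.foldl min d = d := by
        rw [hD] at hpwD
        exact pv_foldl_min_eq t d (fun y hy => le_of_lt ((List.pairwise_cons.mp hpwD).1 y hy))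
      simp [PySem.List.min?_id_cons, hmin]
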